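-- pv_equiv track=rewrite | github.com/NishantMusmade/DSA_codes | Stack/main.py | find_winning_tokens
-- ===== SOURCE A (Python) =====
-- def find_winning_tokens(tokens, N):
--     token_set = set()
--     best_pair = None
--     smallest_diff = float('inf')
--
--     for token in tokens:
--         complement = N - token
--         if complement in token_set:
--             current_diff = abs(token - complement)
--             if current_diff < smallest_diff:
--                 smallest_diff = current_diff
--                 best_pair = (token, complement)
--         token_set.add(token)
--
--     if best_pair:
--         return sorted(best_pair, reverse=True)
--     else:
--         return [0]
-- ===== SOURCE B (Python) =====
-- def find_winning_tokens(tokens, N):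
--     counts = {}
--     for t in tokens:
--         counts[t] = counts.get(t, 0) + 1
--     best = None
--     for x in counts:
--         c = N - x
--         if c in counts and (c != x or counts[x] >= 2):
--             d = abs(2 * x - N)
--             if best is None or d < best[0]:
--                 best = (d, x)
--     if best is None:
--         return [0]
--     x = best[1]
--     return [max(x, N - x), min(x, N - x)]
-- ===== Notes on version B (the rewrite author's own statement) =====
-- stated objective: alternative
-- what changed: B first builds a value->count dictionary, then scans only the distinct values, declaring x pairable when N-x is a key (with count>=2 when x==N-x) and minimizing |2x-N|, reconstructing the pair as (max(x,N-x),min(x,N-x)) instead of A's ordered scan with a seen-set, running best pair and running smallest diff.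
import Mathlib
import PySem

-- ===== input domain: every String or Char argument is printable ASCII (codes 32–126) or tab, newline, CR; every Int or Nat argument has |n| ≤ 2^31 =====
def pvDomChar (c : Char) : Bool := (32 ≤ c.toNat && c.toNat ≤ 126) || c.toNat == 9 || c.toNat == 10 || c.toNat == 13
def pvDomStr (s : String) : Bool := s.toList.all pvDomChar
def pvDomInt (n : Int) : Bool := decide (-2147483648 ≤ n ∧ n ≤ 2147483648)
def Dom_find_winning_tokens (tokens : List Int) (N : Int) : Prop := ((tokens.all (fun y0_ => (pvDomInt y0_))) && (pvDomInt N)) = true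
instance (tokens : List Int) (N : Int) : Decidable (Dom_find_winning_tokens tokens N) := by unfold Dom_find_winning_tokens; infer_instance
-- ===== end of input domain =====

-- B replaces A's ordered seen-set scan by a count-dictionary pass over the distinct values (alternative decomposition, same cost).


-- ===== PORT A =====
-- The loop body of A; Python's smallest_diff starts at float('inf') and is only ever compared,
-- so it is ported as Option Int with none = infinity (exact: none compares greater than everything).
def pyStepA (N : Int) (st : PySem.Set Int × Option (Int × Int) × Option Int) (token : Int) :
    PySem.Set Int × Option (Int × Int) × Option Int :=
  let token_set := st.1
  let best_pair := st.2.1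
  let smallest_diff := st.2.2
  let complement := N - token
  let st' :=
    if PySem.Set.contains token_set complement = true then
      let current_diff := |token - complement|
      if (match smallest_diff with | none => true | some sd => decide (current_diff < sd)) = true then
        (token_set, some (token, complement), some current_diff)
      else (token_set, best_pair, smallest_diff)
    else (token_set, best_pair, smallest_diff)
  (PySem.Set.add st'.1 token, st'.2.1, st'.2.2)

def find_winning_tokens (tokens : List Int) (N : Int) : List Int :=
  let st := tokens.foldl (pyStepA N) (PySem.Set.empty, none, none)
  match st.2.1 with
  | some p => PySem.List.sorted [p.1, p.2] (fun x => x) true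
  | none => [0]

-- ===== PORT B =====
-- The loop body of B's scan over the distinct values (the keys of the count dictionary).
def pyStepB (N : Int) (counts : PySem.Dict Int Int) (best : Option (Int × Int)) (x : Int) :
    Option (Int × Int) :=
  let c := N - x
  if counts.contains c = true ∧ (c ≠ x ∨ 2 ≤ counts.getD x 0) then
    let d := |2 * x - N|
    if (match best with | none => true | some b => decide (d < b.1)) = true then some (d, x)
    else best
  else best

def find_winning_tokens_alt (tokens : List Int) (N : Int) : List Int :=
  let counts := tokens.foldl (fun (d : PySem.Dict Int Int) t => d.insert t (d.getD t 0 + 1)) PySem.Dict.empty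
  let best := (PySem.Dict.keys counts).foldl (pyStepB N counts) none
  match best with
  | none => [0]
  | some b => [max b.2 (N - b.2), min b.2 (N - b.2)]

-- ===== PRECONDITION & SPEC =====
def Spec_find_winning_tokens (tokens : List Int) (N : Int) (out : List Int) : Prop := out = find_winning_tokens_alt tokens N
instance (tokens : List Int) (N : Int) (out : List Int) : Decidable (Spec_find_winning_tokens tokens N out) := by unfold Spec_find_winning_tokens; infer_instance

-- ===== CLAIM (what is proved, stated in full; the proofs are below) =====
def Claim_equal_find_winning_tokens : Prop := ∀ (tokens : List Int) (N : Int), Dom_find_winning_tokens tokens N → Spec_find_winning_tokens tokens N (find_winning_tokens tokens N)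

-- ===== LEMMAS AND PROOFS =====

-- The list of diffs A's scan considers: one |2t-N| per occurrence t whose complement was seen strictly earlier.
def pvCand (N : Int) (seen : List Int) : List Int → List Int
  | [] => []
  | t :: ts => (if (N - t) ∈ seen then [|2 * t - N|] else []) ++ pvCand N (t :: seen) ts

-- The list of diffs B's scan considers: one |2x-N| per pairable distinct value x in k.
def pvCandB (N : Int) (tokens k : List Int) : List Int :=
  (k.filter (fun x => decide ((N - x) ∈ tokens ∧ (N - x ≠ x ∨ 2 ≤ tokens.count x)))).map
    (fun x => |2 * x - N|)

-- "sd is the minimum of cl (none = cl empty)"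
def pvMinP (cl : List Int) (sd : Option Int) : Prop :=
  (sd = none ↔ cl = []) ∧ ∀ d, sd = some d → d ∈ cl ∧ ∀ e ∈ cl, d ≤ e

lemma pvMinP_step (cl : List Int) (sd : Option Int) (v : Int) (h : pvMinP cl sd) :
    pvMinP (cl ++ [v])
      (if (match sd with | none => true | some sd' => decide (v < sd')) = true then some v else sd) := by
  obtain ⟨h1, h2⟩ := h
  cases sd with
  | none =>
    simp at h1; subst h1
    simp [pvMinP]
  | some d =>
    obtain ⟨hd, hmin⟩ := h2 d rfl
    by_cases hv : v < d
    · simp only [hv, decide_true, if_true]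
      refine ⟨by simp, ?_⟩
      rintro e he; injection he with he; subst he
      constructor
      · simp
      · intro e he; rcases List.mem_append.mp he with h | h
        · exact le_of_lt (lt_of_lt_of_le hv (hmin e h))
        · simp at h; omega
    · simp only [hv, decide_false]
      refine ⟨by simp, ?_⟩
      rintro e he; injection he with he; subst he
      exact ⟨List.mem_append.mpr (Or.inl hd), by
        intro e he; rcases List.mem_append.mp he with h | h
        · exact hmin e h
        · simp at h; omega⟩

lemma pvMinP_unique (cl₁ cl₂ : List Int) (s₁ s₂ : Option Int)
    (h₁ : pvMinP cl₁ s₁) (h₂ : pvMinP cl₂ s₂) (hm : ∀ v, v ∈ cl₁ ↔ v ∈ cl₂) : s₁ = s₂ := by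
  obtain ⟨e1, m1⟩ := h₁; obtain ⟨e2, m2⟩ := h₂
  cases s₁ with
  | none =>
    have : cl₁ = [] := e1.mp rfl
    subst this
    cases s₂ with
    | none => rfl
    | some d =>
      obtain ⟨hd, -⟩ := m2 d rfl
      exact absurd ((hm d).mpr hd) (by simp)
  | some d₁ =>
    cases s₂ with
    | none =>
      have : cl₂ = [] := e2.mp rfl
      subst this
      obtain ⟨hd, -⟩ := m1 d₁ rfl
      exact absurd ((hm d₁).mp hd) (by simp)
    | some d₂ =>
      obtain ⟨hd1, hmin1⟩ := m1 d₁ rfl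
      obtain ⟨hd2, hmin2⟩ := m2 d₂ rfl
      have := hmin1 d₂ ((hm d₂).mpr hd2)
      have := hmin2 d₁ ((hm d₁).mp hd1)
      simp; omega

lemma pvAbs_compl (N t : Int) : |2 * (N - t) - N| = |2 * t - N| := by
  have h : 2 * (N - t) - N = -(2 * t - N) := by ring
  rw [h, abs_neg]

lemma mem_pvCand (N v : Int) : ∀ (l seen : List Int), v ∈ pvCand N seen l ↔
    ∃ t ∈ l, v = |2 * t - N| ∧
      ((N - t) ∈ seen ∨ ((N - t) ∈ l ∧ (t ≠ N - t ∨ 2 ≤ l.count t))) := by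
  intro l
  induction l with
  | nil => intro seen; simp [pvCand]
  | cons a ts ih =>
    intro seen
    simp only [pvCand, List.mem_append, ih (a :: seen)]
    constructor
    · rintro (hmem | ⟨t, ht, hv, hcond⟩)
      · have hpair : v = |2 * a - N| ∧ (N - a) ∈ seen := by
          by_cases h : (N - a) ∈ seen
          · simp [h] at hmem; simp [hmem, h]
          · simp [h] at hmem
        exact ⟨a, List.mem_cons_self, hpair.1, Or.inl hpair.2⟩
      · refine ⟨t, List.mem_cons_of_mem a ht, hv, ?_⟩
        rcases hcond with h | ⟨h1, h2⟩
        · rcases List.mem_cons.mp h with heq | hseen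
          · by_cases hta : t = N - t
            · have hat : a = t := by omega
              refine Or.inr ⟨List.mem_cons.mpr (Or.inl heq), Or.inr ?_⟩
              have hc : 1 ≤ ts.count t := List.one_le_count_iff.mpr ht
              rw [List.count_cons]
              simp [hat]; omega
            · exact Or.inr ⟨List.mem_cons.mpr (Or.inl heq), Or.inl hta⟩
          · exact Or.inl hseen
        · refine Or.inr ⟨List.mem_cons_of_mem a h1, ?_⟩
          rcases h2 with h2 | h2
          · exact Or.inl h2
          · right; rw [List.count_cons]; omega
    · rintro ⟨t, ht, hv, hcond⟩
      rcases List.mem_cons.mp ht with rfl | hts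
      · rcases hcond with h | ⟨h1, h2⟩
        · left; simp [h, hv]
        · by_cases hs : (N - t) ∈ seen
          · left; simp [hs, hv]
          · rcases List.mem_cons.mp h1 with heq | hin
            · have hteq : t = N - t := by omega
              rcases h2 with h2 | h2
              · exact absurd hteq h2
              · have hcnt : 1 ≤ ts.count t := by
                  rw [List.count_cons] at h2; simp at h2 ⊢; omega
                have htin : t ∈ ts := List.one_le_count_iff.mp hcnt
                right
                refine ⟨t, htin, hv, Or.inl ?_⟩
                rw [← hteq]; exact List.mem_cons_self
            · right
              refine ⟨N - t, hin, ?_, Or.inl ?_⟩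
              · rw [hv, pvAbs_compl]
              · have : N - (N - t) = t := by ring
                rw [this]; exact List.mem_cons_self
      · rcases hcond with h | ⟨h1, h2⟩
        · right; exact ⟨t, hts, hv, Or.inl (List.mem_cons_of_mem a h)⟩
        · rcases List.mem_cons.mp h1 with heq | hin
          · right
            refine ⟨t, hts, hv, Or.inl ?_⟩
            rw [heq]; exact List.mem_cons_self
          · rcases h2 with h2 | h2
            · right; exact ⟨t, hts, hv, Or.inr ⟨hin, Or.inl h2⟩⟩
            · by_cases hta : t = N - t
              · right
                refine ⟨t, hts, hv, ?_⟩
                by_cases hat : a = t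
                · exact Or.inl (by rw [← hta, hat]; exact List.mem_cons_self)
                · refine Or.inr ⟨hin, Or.inr ?_⟩
                  rw [List.count_cons] at h2
                  simp [hat] at h2 ⊢; omega
              · right; exact ⟨t, hts, hv, Or.inr ⟨hin, Or.inl hta⟩⟩

-- Invariant carried through A's fold.
lemma pvFoldA (N : Int) : ∀ (l seen cl : List Int) (S : PySem.Set Int)
    (best : Option (Int × Int)) (sd : Option Int),
    (∀ y : Int, PySem.Set.contains S y = true ↔ y ∈ seen) →
    pvMinP cl sd →
    (best = none ↔ sd = none) →
    (∀ t c, best = some (t, c) → c = N - t ∧ sd = some |2 * t - N|) →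
    (pvMinP (cl ++ pvCand N seen l) (l.foldl (pyStepA N) (S, best, sd)).2.2 ∧
     ((l.foldl (pyStepA N) (S, best, sd)).2.1 = none ↔ (l.foldl (pyStepA N) (S, best, sd)).2.2 = none) ∧
     (∀ t c, (l.foldl (pyStepA N) (S, best, sd)).2.1 = some (t, c) →
        c = N - t ∧ (l.foldl (pyStepA N) (S, best, sd)).2.2 = some |2 * t - N|)) := by
  intro l
  induction l with
  | nil =>
    intro seen cl S best sd hS hmin hbn hb
    simpa [pvCand] using ⟨hmin, hbn, hb⟩
  | cons a ts ih =>
    intro seen cl S best sd hS hmin hbn hb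
    have habs : |a - (N - a)| = |2 * a - N| := by
      rw [show a - (N - a) = 2 * a - N from by ring]
    have hS' : ∀ y : Int, PySem.Set.contains (PySem.Set.add S a) y = true ↔ y ∈ a :: seen := by
      intro y
      rw [PySem.Set.contains_iff, PySem.Set.mem_add, ← PySem.Set.contains_iff, List.mem_cons]
      rw [hS]; tauto
    rw [List.foldl_cons]
    by_cases hc : (N - a) ∈ seen
    · have hcc : PySem.Set.contains S (N - a) = true := (hS (N - a)).mpr hc
      have hcand : pvCand N seen (a :: ts) = [|2 * a - N|] ++ pvCand N (a :: seen) ts := by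
        simp [pvCand, hc]
      have hassoc : cl ++ ([|2 * a - N|] ++ pvCand N (a :: seen) ts)
          = (cl ++ [|2 * a - N|]) ++ pvCand N (a :: seen) ts := by simp
      cases sd with
      | none =>
        have hb0 : best = none := hbn.mpr rfl
        subst hb0
        have hstep : pyStepA N (S, none, none) a
            = (PySem.Set.add S a, some (a, N - a), some |2 * a - N|) := by
          simp only [pyStepA, hcc]; simp [habs]
        rw [hstep, hcand, hassoc]
        apply ih (a :: seen) (cl ++ [|2 * a - N|]) _ _ _ hS'
        · simpa using pvMinP_step cl none (|2 * a - N|) hmin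
        · simp
        · intro t c h
          simp only [Option.some_inj, Prod.mk.injEq] at h
          obtain ⟨rfl, rfl⟩ := h
          exact ⟨rfl, rfl⟩
      | some sd0 =>
        by_cases hlt : |2 * a - N| < sd0
        · have hstep : pyStepA N (S, best, some sd0) a
              = (PySem.Set.add S a, some (a, N - a), some |2 * a - N|) := by
            simp only [pyStepA, hcc]; simp [habs, hlt]
          rw [hstep, hcand, hassoc]
          apply ih (a :: seen) (cl ++ [|2 * a - N|]) _ _ _ hS'
          · simpa [hlt] using pvMinP_step cl (some sd0) (|2 * a - N|) hmin
          · simp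
          · intro t c h
            simp only [Option.some_inj, Prod.mk.injEq] at h
            obtain ⟨rfl, rfl⟩ := h
            exact ⟨rfl, rfl⟩
        · have hstep : pyStepA N (S, best, some sd0) a
              = (PySem.Set.add S a, best, some sd0) := by
            simp only [pyStepA, hcc]; simp [habs, hlt]
          rw [hstep, hcand, hassoc]
          apply ih (a :: seen) (cl ++ [|2 * a - N|]) _ _ _ hS'
          · simpa [hlt] using pvMinP_step cl (some sd0) (|2 * a - N|) hmin
          · exact hbn
          · exact hb
    · have hcc : PySem.Set.contains S (N - a) = false := by
        rw [← Bool.not_eq_true, hS]; exact hc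
      have hstep : pyStepA N (S, best, sd) a = (PySem.Set.add S a, best, sd) := by
        simp only [pyStepA, hcc]; simp
      rw [hstep]
      have hcand : pvCand N seen (a :: ts) = pvCand N (a :: seen) ts := by
        simp [pvCand, hc]
      rw [hcand]
      exact ih (a :: seen) cl _ _ _ hS' hmin hbn hb

-- Invariant carried through B's fold over the distinct values.
lemma pvFoldB (N : Int) (tokens : List Int) (counts : PySem.Dict Int Int)
    (hc : ∀ c : Int, counts.contains c = true ↔ c ∈ tokens)
    (hg : ∀ x : Int, counts.getD x 0 = tokens.count x) :
    ∀ (k : List Int) (best : Option (Int × Int)) (cl : List Int),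
    pvMinP cl (best.map Prod.fst) →
    (∀ d x, best = some (d, x) → d = |2 * x - N|) →
    (pvMinP (cl ++ pvCandB N tokens k) ((k.foldl (pyStepB N counts) best).map Prod.fst) ∧
     ∀ d x, k.foldl (pyStepB N counts) best = some (d, x) → d = |2 * x - N|) := by
  intro k
  induction k with
  | nil =>
    intro best cl hmin hb
    simpa [pvCandB] using ⟨hmin, hb⟩
  | cons a ks ih =>
    intro best cl hmin hb
    rw [List.foldl_cons]
    by_cases hcond : (N - a) ∈ tokens ∧ (N - a ≠ a ∨ 2 ≤ tokens.count a)
    · have hcond' : counts.contains (N - a) = true ∧ (N - a ≠ a ∨ 2 ≤ counts.getD a 0) := by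
        refine ⟨(hc _).mpr hcond.1, ?_⟩
        rcases hcond.2 with h | h
        · exact Or.inl h
        · right; rw [hg]; exact_mod_cast h
      have hcand : pvCandB N tokens (a :: ks) = [|2 * a - N|] ++ pvCandB N tokens ks := by
        simp [pvCandB, hcond]
      have hassoc : cl ++ ([|2 * a - N|] ++ pvCandB N tokens ks)
          = (cl ++ [|2 * a - N|]) ++ pvCandB N tokens ks := by simp
      cases best with
      | none =>
        have hstep : pyStepB N counts none a = some (|2 * a - N|, a) := by
          simp only [pyStepB]; rw [if_pos hcond']; simp
        rw [hstep, hcand, hassoc]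
        apply ih
        · simpa using pvMinP_step cl none (|2 * a - N|) (by simpa using hmin)
        · intro d x h
          simp only [Option.some_inj, Prod.mk.injEq] at h
          obtain ⟨rfl, rfl⟩ := h
          rfl
      | some b =>
        obtain ⟨bd, bx⟩ := b
        simp only [Option.map_some] at hmin
        by_cases hlt : |2 * a - N| < bd
        · have hstep : pyStepB N counts (some (bd, bx)) a = some (|2 * a - N|, a) := by
            simp only [pyStepB]; rw [if_pos hcond']; simp [hlt]
          rw [hstep, hcand, hassoc]
          apply ih
          · simpa [hlt] using pvMinP_step cl (some bd) (|2 * a - N|) hmin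
          · intro d x h
            simp only [Option.some_inj, Prod.mk.injEq] at h
            obtain ⟨rfl, rfl⟩ := h
            rfl
        · have hstep : pyStepB N counts (some (bd, bx)) a = some (bd, bx) := by
            simp only [pyStepB]; rw [if_pos hcond']; simp [hlt]
          rw [hstep, hcand, hassoc]
          apply ih
          · simpa [hlt] using pvMinP_step cl (some bd) (|2 * a - N|) hmin
          · exact hb
    · have hK : ¬ (counts.contains (N - a) = true ∧ (N - a ≠ a ∨ 2 ≤ counts.getD a 0)) := by
        rintro ⟨h1, h2⟩
        rw [hc] at h1
        refine hcond ⟨h1, ?_⟩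
        rcases h2 with h | h
        · exact Or.inl h
        · right; rw [hg] at h; exact_mod_cast h
      have hstep : pyStepB N counts best a = best := by
        simp only [pyStepB]; rw [if_neg hK]
      rw [hstep]
      have hcand : pvCandB N tokens (a :: ks) = pvCandB N tokens ks := by
        simp [pvCandB, hcond]
      rw [hcand]
      exact ih best cl hmin hb

lemma sorted_pair_desc (a b : Int) :
    PySem.List.sorted [a, b] (fun x => x) true = [max a b, min a b] := by
  rcases le_or_gt b a with h | h
  · have : PySem.List.sorted [a, b] (fun x => x) true = [a, b] := by
      apply PySem.List.sorted_rev_eq_self_of_pairwise; simp [h]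
    rw [this, max_eq_left h, min_eq_right h]
  · have : PySem.List.sorted [a, b] (fun x => x) true = [b, a] := by
      simp [PySem.List.sorted, PySem.List.insertBy, h]
    rw [this, max_eq_right (le_of_lt h), min_eq_left (le_of_lt h)]

-- ===== VERDICT (by name: the statement is the Claim_ definition above) =====
theorem find_winning_tokens_spec : Claim_equal_find_winning_tokens := by
  intro tokens N _
  unfold Spec_find_winning_tokens find_winning_tokens find_winning_tokens_alt
  -- facts about the count dictionary
  set counts := tokens.foldl (fun (d : PySem.Dict Int Int) t => d.insert t (d.getD t 0 + 1)) PySem.Dict.empty with hcounts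
  have hkeys : counts.keys = PySem.Set.ofList tokens := by
    rw [hcounts, PySem.Dict.keys_foldl_insert]
    simp [PySem.Set.update_nil_left]
  have hc : ∀ c : Int, counts.contains c = true ↔ c ∈ tokens := by
    intro c
    rw [PySem.Dict.contains_iff_mem_keys, hkeys, PySem.Set.mem_ofList]
  have hg : ∀ x : Int, counts.getD x 0 = tokens.count x := by
    intro x
    rw [hcounts, PySem.Dict.getD_foldl_insert_add_one]
    simp
  -- run the two fold invariants
  have hA := pvFoldA N tokens [] [] PySem.Set.empty none none
    (by intro y; simp [PySem.Set.empty])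
    (by simp [pvMinP]) (by simp) (by simp)
  have hB := pvFoldB N tokens counts hc hg counts.keys none []
    (by simp [pvMinP]) (by simp)
  simp only [List.nil_append] at hA hB
  obtain ⟨hminA, hbnA, hbA⟩ := hA
  obtain ⟨hminB, hbB⟩ := hB
  -- the two candidate lists have the same members
  have hmem : ∀ v, v ∈ pvCand N [] tokens ↔ v ∈ pvCandB N tokens counts.keys := by
    intro v
    rw [mem_pvCand]
    unfold pvCandB
    simp only [List.mem_map, List.mem_filter, hkeys, PySem.Set.mem_ofList, decide_eq_true_eq]
    constructor
    · rintro ⟨t, ht, hv, hcond⟩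
      rcases hcond with h | ⟨h1, h2⟩
      · simp at h
      · exact ⟨t, ⟨ht, h1, by tauto⟩, hv.symm⟩
    · rintro ⟨x, ⟨hx, h1, h2⟩, hv⟩
      exact ⟨x, hx, hv.symm, Or.inr ⟨h1, by tauto⟩⟩
  have hsd : (tokens.foldl (pyStepA N) (PySem.Set.empty, none, none)).2.2 =
      ((counts.keys.foldl (pyStepB N counts) none).map Prod.fst) :=
    pvMinP_unique _ _ _ _ hminA hminB hmem
  -- compare the final results
  cases hBB : counts.keys.foldl (pyStepB N counts) none with
  | none =>
    have : (tokens.foldl (pyStepA N) (PySem.Set.empty, none, none)).2.2 = none := by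
      rw [hsd, hBB]; rfl
    have hAnone := hbnA.mpr this
    simp only [hAnone, hBB]
  | some b =>
    obtain ⟨d, x⟩ := b
    have hdx : d = |2 * x - N| := hbB d x hBB
    have hsome : (tokens.foldl (pyStepA N) (PySem.Set.empty, none, none)).2.2 = some d := by
      rw [hsd, hBB]; rfl
    cases hAA : (tokens.foldl (pyStepA N) (PySem.Set.empty, none, none)).2.1 with
    | none =>
      rw [hbnA.mp hAA] at hsome; cases hsome
    | some p =>
      obtain ⟨t, c⟩ := p
      obtain ⟨hcc, hsdA⟩ := hbA t c hAA
      rw [hsome] at hsdA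
      have heq : |2 * t - N| = |2 * x - N| := by
        injection hsdA with h; rw [← h, hdx]
      subst hcc
      simp only [hBB, hAA]
      rw [sorted_pair_desc]
      have : t = x ∨ t = N - x := by
        rcases abs_eq_abs.mp heq with h | h <;> omega
      rcases this with rfl | rfl
      · rfl
      · rw [show N - (N - x) = x from by ring, max_comm, min_comm]
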